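-- pv_equiv track=rewrite | github.com/lulongtw/test | python/unarranged/coci18c2p1  MEME.py | fulltimescore
-- ===== SOURCE A (Python) =====
-- def fulltimescore(team) :
--     fts = [0]
--     count = 0
--     for i in range(1,2881) :
--         if i == team[count] :
--             count = count + 1
--             if count == len(team) :
--                 count = count - 1
--             fts.append(fts[i-1]+ 1)
--         else :
--             fts.append(fts[i-1])
--     return fts
-- ===== SOURCE B (Python) =====
-- def fulltimescore(team):
--     # First pass: collect breakpoints (strictly increasing markers within 1..2880);
--     # the pointer in the original stalls permanently at the first failing marker.
--     bps = []
--     last = 0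
--     for b in team:
--         if last < b <= 2880:
--             bps.append(b)
--             last = b
--         else:
--             break
--     # Second pass: build the prefix-count list segment by segment.
--     fts = [0]
--     level = 0
--     prev = 0
--     for b in bps:
--         fts.extend([level] * (b - prev - 1))
--         level += 1
--         fts.append(level)
--         prev = b
--     fts.extend([level] * (2880 - prev))
--     return fts
-- ===== Notes on version B (the rewrite author's own statement) =====
-- stated objective: alternative
-- what changed: A scans all 2880 minutes with a stalled-pointer comparison; B first extracts the strictly-increasing breakpoint prefix of team in one pass, then builds the 2881-entry prefix-count list segment by segment with list-replication.
-- outside the precondition, e.g. on fulltimescore([]): A raises IndexError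
import Mathlib
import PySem

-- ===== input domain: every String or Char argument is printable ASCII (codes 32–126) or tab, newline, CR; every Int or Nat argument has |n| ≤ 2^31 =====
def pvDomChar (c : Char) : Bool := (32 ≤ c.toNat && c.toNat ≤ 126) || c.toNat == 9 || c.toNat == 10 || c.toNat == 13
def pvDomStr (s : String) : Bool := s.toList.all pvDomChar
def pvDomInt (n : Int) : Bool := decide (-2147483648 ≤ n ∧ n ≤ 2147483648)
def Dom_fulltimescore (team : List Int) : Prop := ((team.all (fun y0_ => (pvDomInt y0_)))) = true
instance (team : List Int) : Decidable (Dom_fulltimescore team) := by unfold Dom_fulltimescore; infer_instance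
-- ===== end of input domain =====

-- B replaces A's 2880-step stalled-pointer scan by a breakpoint extraction pass plus bulk segment fills (alternative decomposition, same cost).


-- ===== PORT A =====
-- A's for-loop over range(1, 2881), state (fts, count); fts[i-1] is always in range when
-- executed, hence .getD 0 is exact; PySem.List.pyGet? team count = some i is Python's i == team[count]
def fulltimescoreLoop (team : List Int) (fts : List Int) (count : Int) : List Int → List Int
  | [] => fts
  | i :: rest =>
    let prev := (PySem.List.pyGet? fts (i - 1)).getD 0
    if PySem.List.pyGet? team count = some i then
      fulltimescoreLoop team (fts ++ [prev + 1])
        (if count + 1 = (team.length : Int) then count + 1 - 1 else count + 1) rest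
    else
      fulltimescoreLoop team (fts ++ [prev]) count rest

def fulltimescore (team : List Int) : List Int :=
  fulltimescoreLoop team [0] 0 (PySem.List.pyRange 1 2881 1)

-- ===== PORT B =====
-- first pass of Source B: collect the strictly increasing breakpoint prefix, break at the first failure
def fulltimescoreBreaks (last : Int) : List Int → List Int
  | [] => []
  | b :: rest => if last < b ∧ b ≤ 2880 then b :: fulltimescoreBreaks b rest else []

-- second pass of Source B: state (fts, level, prev)
def fulltimescoreFill (s : List Int × Int × Int) (b : Int) : List Int × Int × Int :=
  (s.1 ++ List.replicate (b - s.2.2 - 1).toNat s.2.1 ++ [s.2.1 + 1], s.2.1 + 1, b)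

def fulltimescore_alt (team : List Int) : List Int :=
  let s := (fulltimescoreBreaks 0 team).foldl fulltimescoreFill ([0], 0, 0)
  s.1 ++ List.replicate (2880 - s.2.2).toNat s.2.1

-- ===== PRECONDITION & SPEC =====
-- A evaluates team[0] on its first iteration, so it raises IndexError on the empty list; Pre_ excludes exactly that.
def Pre_fulltimescore (team : List Int) : Prop := team ≠ []
instance (team : List Int) : Decidable (Pre_fulltimescore team) := by unfold Pre_fulltimescore; infer_instance
def pvWitness_fulltimescore : List Int := ([3, 100, 99])

def Spec_fulltimescore (team : List Int) (out : List Int) : Prop := out = fulltimescore_alt team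
instance (team : List Int) (out : List Int) : Decidable (Spec_fulltimescore team out) := by unfold Spec_fulltimescore; infer_instance

-- ===== CLAIM (what is proved, stated in full; the proofs are below) =====
def Claim_equal_fulltimescore : Prop := ∀ (team : List Int), Dom_fulltimescore team → Pre_fulltimescore team → Spec_fulltimescore team (fulltimescore team)

-- ===== LEMMAS AND PROOFS =====

-- recursive form of B's second pass
def fillR (fts : List Int) (level prev : Int) : List Int → List Int
  | [] => fts ++ List.replicate (2880 - prev).toNat level
  | b :: bs => fillR (fts ++ List.replicate (b - prev - 1).toNat level ++ [level + 1]) (level + 1) b bs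

lemma fill_foldl (bps : List Int) : ∀ (fts : List Int) (level prev : Int),
    (let s := bps.foldl fulltimescoreFill (fts, level, prev)
     s.1 ++ List.replicate (2880 - s.2.2).toNat s.2.1) = fillR fts level prev bps := by
  induction bps with
  | nil => intro fts level prev; simp [fillR]
  | cons b bs ih => intro fts level prev; simpa [fillR, fulltimescoreFill] using ih _ _ _

lemma alt_eq_fillR (team : List Int) :
    fulltimescore_alt team = fillR [0] 0 0 (fulltimescoreBreaks 0 team) := by
  simpa [fulltimescore_alt] using fill_foldl (fulltimescoreBreaks 0 team) [0] 0 0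

lemma pyGet?_last (fts : List Int) (v : Int) (h : fts.getLast? = some v) :
    PySem.List.pyGet? fts ((fts.length : Int) - 1) = some v := by
  have hne : fts ≠ [] := by rintro rfl; simp at h
  have hlen : 0 < fts.length := List.length_pos_iff.mpr hne
  rw [show ((fts.length : Int) - 1) = ((fts.length - 1 : Nat) : Int) by omega,
    PySem.List.pyGet?_natCast, List.getElem?_eq_getElem (by omega), ← List.getLast_eq_getElem hne]
  rw [List.getLast?_eq_some_getLast hne] at h
  exact h

-- while team[c] never equals any i of the range segment, each step appends the running last value
lemma const_seg (team : List Int) : ∀ (n : Nat) (a b : Int) (fts : List Int) (c v : Int) (L : List Int),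
    b - a = n → 1 ≤ a →
    (fts.length : Int) = a → fts.getLast? = some v →
    (∀ i : Int, a ≤ i → i < b → PySem.List.pyGet? team c ≠ some i) →
    fulltimescoreLoop team fts c (PySem.List.pyRange a b 1 ++ L)
      = fulltimescoreLoop team (fts ++ List.replicate n v) c L := by
  intro n
  induction n with
  | zero =>
    intro a b fts c v L hn _ _ _ _
    rw [PySem.List.pyRange_one_eq_nil (by omega)]
    simp
  | succ m ih =>
    intro a b fts c v L hn ha hlen hlast hno
    rw [PySem.List.pyRange_one_cons (by omega), List.cons_append]
    simp only [fulltimescoreLoop]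
    rw [if_neg (hno a le_rfl (by omega))]
    have hprev : PySem.List.pyGet? fts (a - 1) = some v := by
      rw [← hlen]; exact pyGet?_last fts v hlast
    rw [hprev]
    have := ih (a + 1) b (fts ++ [v]) c v L (by omega) (by omega)
      (by simp; omega) (by simp) (fun i h1 h2 => hno i (by omega) h2)
    simpa [List.replicate_succ, List.append_assoc] using this

lemma last_append_replicate (xs : List Int) (k : Nat) (v : Int) (h : xs.getLast? = some v) :
    (xs ++ List.replicate k v).getLast? = some v := by
  cases k with
  | zero => simpa using h
  | succ m => simp [List.getLast?_append, List.replicate_succ']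

-- main invariant: from minute prev+1 on, A's fold realises B's segment construction for the remaining breakpoints
lemma main_fold (team : List Int) : ∀ (n : Nat) (c : Nat) (prev level : Int) (fts : List Int),
    team.length - c = n → c < team.length →
    0 ≤ prev → prev ≤ 2880 →
    (fts.length : Int) = prev + 1 → fts.getLast? = some level →
    fulltimescoreLoop team fts (c : Int) (PySem.List.pyRange (prev + 1) 2881 1)
      = fillR fts level prev (fulltimescoreBreaks prev (team.drop c)) := by
  intro n
  induction n with
  | zero => intro c prev level fts hn hc _ _ _ _; omega
  | succ m ih =>
    intro c prev level fts hn hc hprev0 hprev2880 hlen hlast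
    have hdrop : team.drop c = team[c] :: team.drop (c + 1) := List.drop_eq_getElem_cons hc
    have hget : PySem.List.pyGet? team (c : Int) = some team[c] := by
      rw [PySem.List.pyGet?_natCast, List.getElem?_eq_getElem hc]
    by_cases hb : prev < team[c] ∧ team[c] ≤ 2880
    · -- a breakpoint: fill the stalled segment, take the matching step, recurse or finish
      rw [hdrop]
      simp only [fulltimescoreBreaks, if_pos hb]
      rw [PySem.List.pyRange_one_append (prev + 1) team[c] 2881 (by omega) (by omega),
        const_seg team (team[c] - prev - 1).toNat (prev + 1) team[c] fts (c : Int) level _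
          (by omega) (by omega) hlen hlast
          (by intro i h1 h2 hcontra; rw [hget] at hcontra; simp at hcontra; omega),
        PySem.List.pyRange_one_cons (by omega)]
      simp only [fulltimescoreLoop]
      have hlast' := last_append_replicate fts (team[c] - prev - 1).toNat level hlast
      have hlen' : ((fts ++ List.replicate (team[c] - prev - 1).toNat level).length : Int)
          = team[c] := by simp [hlen]; omega
      have hpv : PySem.List.pyGet? (fts ++ List.replicate (team[c] - prev - 1).toNat level)
          (team[c] - 1) = some level := by
        have := pyGet?_last _ level hlast'
        rwa [hlen'] at this
      rw [if_pos hget, hpv]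
      simp only [Option.getD_some]
      by_cases hcl : c + 1 = team.length
      · -- last marker consumed: count is reset and stalls for good
        rw [if_pos (by exact_mod_cast congrArg (Nat.cast : Nat → Int) hcl)]
        have hc' : (c : Int) + 1 - 1 = (c : Int) := by omega
        rw [hc']
        have h0 := const_seg team (2880 - team[c]).toNat (team[c] + 1) 2881
          ((fts ++ List.replicate (team[c] - prev - 1).toNat level) ++ [level + 1]) (c : Int)
          (level + 1) [] (by omega) (by omega)
          (by simp [hlen]; omega) (by simp)
          (by intro i h1 h2 hcontra; rw [hget] at hcontra; simp at hcontra; omega)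
        simp only [List.append_nil] at h0
        rw [h0]
        have hdrop' : List.drop (c + 1) team = [] := by simp [hcl]
        rw [hdrop']
        simp [fulltimescoreBreaks, fillR, fulltimescoreLoop, List.append_assoc]
      · -- more markers to scan: recurse
        rw [if_neg (by intro hcontra; exact hcl (by exact_mod_cast hcontra))]
        have hcast : (c : Int) + 1 = ((c + 1 : Nat) : Int) := by push_cast; ring
        rw [hcast]
        rw [ih (c + 1) team[c] (level + 1)
          ((fts ++ List.replicate (team[c] - prev - 1).toNat level) ++ [level + 1])
          (by omega) (by omega) (by omega) (by omega)
          (by simp [hlen]; omega) (by simp)]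
        simp only [fillR]
    · -- no breakpoint: the pointer stalls for the rest of the range
      rw [hdrop]
      simp only [fulltimescoreBreaks, if_neg hb]
      have := const_seg team (2881 - (prev + 1)).toNat (prev + 1) 2881 fts (c : Int) level []
        (by omega) (by omega) hlen hlast
        (by intro i h1 h2 hcontra; rw [hget] at hcontra; simp at hcontra; omega)
      simp only [List.append_nil] at this
      rw [this]
      simp only [fulltimescoreLoop, fillR]
      have : (2881 - (prev + 1)).toNat = (2880 - prev).toNat := by omega
      rw [this]

-- ===== VERDICT (by name: the statement is the Claim_ definition above) =====
theorem fulltimescore_spec : Claim_equal_fulltimescore := by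
  intro team _ hpre
  unfold Spec_fulltimescore
  have hlen : 0 < team.length := List.length_pos_iff.mpr hpre
  have h := main_fold team team.length 0 0 0 [0] (by omega) hlen (by norm_num) (by norm_num)
    (by simp) (by simp)
  rw [alt_eq_fillR]
  simp only [Nat.cast_zero, List.drop_zero, show (0 : Int) + 1 = 1 from rfl] at h
  exact h
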